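-- pv_equiv track=rewrite | github.com/oribirnboim/nand_to_tetris | projects2025/10/JackTokenizer.py | split_by_symbols
-- ===== SOURCE A (Python) =====
-- symbols = {'{', '}', '(', ')', '[', ']', '.', ',', ';', '+', '-', '*', '/', '&', '|', '<', '>', '=', '~', '^', '#'}
--
-- def split_by_symbols(word):
--     if not word: return []
--     if word[0]=='"': return [word]
--     res = []
--     symbol_indices = []
--     for i in range(len(word)):
--         if word[i] in symbols: symbol_indices.append(i)
--     start_index = 0
--     for s in symbol_indices:
--         res.append(word[start_index:s])
--         res.append(word[s:s+1])
--         start_index = s+1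
--     res.append(word[start_index:])
--     return list(filter(lambda s: s != "", res))
-- ===== SOURCE B (Python) =====
-- symbols = {'{', '}', '(', ')', '[', ']', '.', ',', ';', '+', '-', '*', '/', '&', '|', '<', '>', '=', '~', '^', '#'}
--
-- def split_by_symbols(word):
--     if not word: return []
--     if word[0] == '"': return [word]
--     res = []
--     buf = ""
--     for ch in word:
--         if ch in symbols:
--             if buf: res.append(buf)
--             res.append(ch)
--             buf = ""
--         else:
--             buf += ch
--     if buf: res.append(buf)
--     return res
-- ===== Notes on version B (the rewrite author's own statement) =====
-- stated objective: simpler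
-- what changed: Replaced A's two-phase index-table-then-slice-then-filter construction with a single linear pass that accumulates a buffer and emits tokens directly, never building the symbol-index list, taking slices, or post-filtering empties.
import Mathlib
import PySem

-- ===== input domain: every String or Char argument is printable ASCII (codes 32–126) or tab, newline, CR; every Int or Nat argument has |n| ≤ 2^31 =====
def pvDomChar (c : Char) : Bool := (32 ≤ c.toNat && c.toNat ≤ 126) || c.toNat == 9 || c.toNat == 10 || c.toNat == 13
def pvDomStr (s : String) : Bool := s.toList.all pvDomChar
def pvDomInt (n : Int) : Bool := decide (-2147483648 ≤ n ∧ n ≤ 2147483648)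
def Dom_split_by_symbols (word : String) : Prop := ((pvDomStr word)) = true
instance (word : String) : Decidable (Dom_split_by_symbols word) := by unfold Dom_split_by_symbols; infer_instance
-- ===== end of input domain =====

-- B replaces A's index-table + slicing + post-filter with one buffered pass (objective: simpler).

-- the module constant `symbols` (a Python set of distinct chars)
def symbolsL : PySem.Set Char :=
  PySem.Set.ofList ['{', '}', '(', ')', '[', ']', '.', ',', ';', '+', '-', '*', '/', '&', '|', '<', '>', '=', '~', '^', '#']

-- ===== PORT A =====
def split_by_symbols (word : String) : List String :=
  let w := word.toList
  if w = [] then []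
  else if PySem.List.pyGet? w 0 = some '"' then [word]
  else
    let symbol_indices : List Int :=
      (PySem.List.pyRange 0 (w.length : Int)).foldl
        (fun acc i =>
          if (PySem.List.pyGet? w i).any (fun c => symbolsL.contains c) then acc ++ [i] else acc) []
    let p := symbol_indices.foldl
        (fun (p : List (List Char) × Int) s =>
          (p.1 ++ [PySem.List.slice w (some p.2) (some s), PySem.List.slice w (some s) (some (s + 1))], s + 1))
        ([], 0)
    let res := p.1 ++ [PySem.List.slice w (some p.2) none]
    (res.filter (fun t => t ≠ [])).map String.ofList

-- ===== PORT B =====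
def split_by_symbols_alt (word : String) : List String :=
  let w := word.toList
  if w = [] then []
  else if PySem.List.pyGet? w 0 = some '"' then [word]
  else
    let p := w.foldl
        (fun (p : List (List Char) × List Char) c =>
          if symbolsL.contains c then
            ((p.1 ++ (if p.2 = [] then [] else [p.2])) ++ [[c]], [])
          else (p.1, p.2 ++ [c]))
        ([], [])
    (if p.2 = [] then p.1 else p.1 ++ [p.2]).map String.ofList

-- ===== PRECONDITION & SPEC =====
def Spec_split_by_symbols (word : String) (out : List String) : Prop := out = split_by_symbols_alt word
instance (word : String) (out : List String) : Decidable (Spec_split_by_symbols word out) := by unfold Spec_split_by_symbols; infer_instance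

-- ===== CLAIM (what is proved, stated in full; the proofs are below) =====
def Claim_equal_split_by_symbols : Prop := ∀ (word : String), Dom_split_by_symbols word → Spec_split_by_symbols word (split_by_symbols word)

-- ===== LEMMAS AND PROOFS =====

-- the positions (front to back) of symbol characters in w
def symIdx : List Char → List Nat
  | [] => []
  | c :: t => if symbolsL.contains c then 0 :: (symIdx t).map (· + 1) else (symIdx t).map (· + 1)

-- A's piece list, on Nat indices
def goN (w : List Char) : Nat → List Nat → List (List Char)
  | start, [] => [w.drop start]
  | start, s :: is => (w.drop start).take (s - start) :: (w.drop s).take 1 :: goN w (s + 1) is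

-- the common tokenisation both programs compute
def tok : List Char → List Char → List (List Char)
  | buf, [] => if buf = [] then [] else [buf]
  | buf, c :: t =>
    if symbolsL.contains c then (if buf = [] then [] else [buf]) ++ [c] :: tok [] t
    else tok (buf ++ [c]) t

theorem modifyHead_nil_append (l : List (List Char)) :
    l.modifyHead (fun x => [] ++ x) = l := by
  cases l <;> simp

theorem symIdx_eq (w : List Char) :
    (List.range w.length).filter (fun k => (w[k]?).any fun c => symbolsL.contains c) = symIdx w := by
  induction w with
  | nil => rfl
  | cons c t ih =>
    simp only [List.length_cons, List.range_succ_eq_map, List.filter_cons, symIdx,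
      List.filter_map]
    have : ((fun k => ((c :: t)[k]?).any fun c => symbolsL.contains c) ∘ Nat.succ)
        = fun k => (t[k]?).any fun c => symbolsL.contains c := by
      funext k; simp
    rw [this, ih]
    by_cases h : symbolsL.contains c <;> simp

theorem foldl_goN (w : List Char) (is : List Nat) :
    ∀ (acc : List (List Char)) (start : Nat),
      ((is.map (fun (k : Nat) => (k : Int))).foldl
          (fun (p : List (List Char) × Int) s =>
            (p.1 ++ [PySem.List.slice w (some p.2) (some s), PySem.List.slice w (some s) (some (s + 1))], s + 1))
          (acc, (start : Int))).1
        ++ [PySem.List.slice w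
            (some ((is.map (fun (k : Nat) => (k : Int))).foldl
              (fun (p : List (List Char) × Int) s =>
                (p.1 ++ [PySem.List.slice w (some p.2) (some s), PySem.List.slice w (some s) (some (s + 1))], s + 1))
              (acc, (start : Int))).2) none]
      = acc ++ goN w start is := by
  induction is with
  | nil => intro acc start; simp [goN, PySem.List.slice_from_natCast]
  | cons s is ih =>
    intro acc start
    simp only [List.map_cons, List.foldl_cons]
    have h1 : ((s : Int) + 1) = ((s + 1 : Nat) : Int) := by push_cast; ring
    rw [h1, PySem.List.slice_natCast w start s]
    have h2 : PySem.List.slice w (some (s : Int)) (some ((s + 1 : Nat) : Int))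
        = (w.drop s).take 1 := by
      rw [PySem.List.slice_natCast w s (s + 1)]; simp
    rw [h2, ih]
    simp [goN]

theorem goN_shift (c : Char) (t : List Char) (is : List Nat) :
    ∀ start, goN (c :: t) (start + 1) (is.map (· + 1)) = goN t start is := by
  induction is with
  | nil => intro start; simp [goN]
  | cons s is ih =>
    intro start
    simp only [List.map_cons, goN, List.drop_succ_cons, ih,
      show s + 1 - (start + 1) = s - start from by omega]

theorem goN_cons (c : Char) (t : List Char) (is : List Nat) :
    goN (c :: t) 0 (is.map (· + 1)) = (goN t 0 is).modifyHead (c :: ·) := by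
  cases is with
  | nil => simp [goN]
  | cons s is =>
    simp only [List.map_cons, goN, List.drop_zero, List.drop_succ_cons, Nat.sub_zero]
    rw [goN_shift c t is (s + 1)]
    simp [List.take_succ_cons]

theorem goN_sym (c : Char) (t : List Char) (is : List Nat) :
    goN (c :: t) 0 (0 :: is.map (· + 1)) = [] :: [c] :: goN t 0 is := by
  have := goN_shift c t is 0
  simp only [goN, List.drop_zero, Nat.sub_zero, List.take_zero, List.take_one, zero_add] at *
  simp [this]

theorem filter_goN (t : List Char) : ∀ buf : List Char,
    ((goN t 0 (symIdx t)).modifyHead (buf ++ ·)).filter (fun s => s ≠ []) = tok buf t := by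
  induction t with
  | nil =>
    intro buf
    by_cases h : buf = [] <;> simp [goN, symIdx, tok, h]
  | cons c t ih =>
    intro buf
    have htail := ih []
    rw [modifyHead_nil_append] at htail
    by_cases h : symbolsL.contains c
    · have hm : c ∈ symbolsL := by simpa using h
      simp only [symIdx, h, if_pos, goN_sym]
      simp only [List.modifyHead_cons, List.filter_cons, htail]
      by_cases hb : buf = [] <;> simp [hb, tok, hm]
    · have hm : c ∉ symbolsL := by simpa using h
      simp only [symIdx, h, Bool.false_eq_true, if_neg, not_false_iff]
      rw [goN_cons, List.modifyHead_modifyHead]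
      have hcomp : ((buf ++ ·) ∘ (c :: ·)) = ((buf ++ [c]) ++ ·) := by
        funext x; simp
      rw [hcomp, ih]
      simp [tok, hm]

theorem foldl_tok (t : List Char) : ∀ (res : List (List Char)) (buf : List Char),
    (if (t.foldl
        (fun (p : List (List Char) × List Char) c =>
          if symbolsL.contains c then
            ((p.1 ++ (if p.2 = [] then [] else [p.2])) ++ [[c]], [])
          else (p.1, p.2 ++ [c]))
        (res, buf)).2 = []
      then (t.foldl
        (fun (p : List (List Char) × List Char) c =>
          if symbolsL.contains c then
            ((p.1 ++ (if p.2 = [] then [] else [p.2])) ++ [[c]], [])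
          else (p.1, p.2 ++ [c]))
        (res, buf)).1
      else (t.foldl
        (fun (p : List (List Char) × List Char) c =>
          if symbolsL.contains c then
            ((p.1 ++ (if p.2 = [] then [] else [p.2])) ++ [[c]], [])
          else (p.1, p.2 ++ [c]))
        (res, buf)).1 ++ [(t.foldl
        (fun (p : List (List Char) × List Char) c =>
          if symbolsL.contains c then
            ((p.1 ++ (if p.2 = [] then [] else [p.2])) ++ [[c]], [])
          else (p.1, p.2 ++ [c]))
        (res, buf)).2]) = res ++ tok buf t := by
  induction t with
  | nil => intro res buf; by_cases h : buf = [] <;> simp [tok, h]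
  | cons c t ih =>
    intro res buf
    simp only [List.foldl_cons]
    by_cases h : symbolsL.contains c
    · simp only [h, if_pos, ih, tok]
      by_cases hb : buf = [] <;> simp [hb]
    · simp only [h, Bool.false_eq_true, if_neg, not_false_iff, ih, tok]

-- ===== VERDICT (by name: the statement is the Claim_ definition above) =====
theorem split_by_symbols_spec : Claim_equal_split_by_symbols := by
  intro word _
  unfold Spec_split_by_symbols split_by_symbols split_by_symbols_alt
  by_cases h0 : word.toList = []
  · simp [h0]
  · simp only [h0, if_neg, not_false_iff]
    by_cases h1 : PySem.List.pyGet? word.toList 0 = some '"'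
    · simp [h1]
    · simp only [h1, if_neg, not_false_iff]
      have hidx :
          (PySem.List.pyRange 0 (word.toList.length : Int)).foldl
            (fun acc i =>
              if (PySem.List.pyGet? word.toList i).any (fun c => symbolsL.contains c)
              then acc ++ [i] else acc) []
          = (symIdx word.toList).map (fun (k : Nat) => (k : Int)) := by
        rw [PySem.List.pyRange_zero_natCast,
          PySem.List.foldl_append_if_eq_filter
            (fun i => (PySem.List.pyGet? word.toList i).any (fun c => symbolsL.contains c)),
          List.filter_map]
        have : ((fun i => (PySem.List.pyGet? word.toList i).any fun c => symbolsL.contains c)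
            ∘ fun (k : Nat) => (k : Int))
            = fun k => (word.toList[k]?).any fun c => symbolsL.contains c := by
          funext k; simp [PySem.List.pyGet?_natCast]
        rw [this, symIdx_eq]
        simp
      rw [hidx]
      have hA := foldl_goN word.toList (symIdx word.toList) [] 0
      simp only [Nat.cast_zero] at hA
      rw [hA]
      have hB := foldl_tok word.toList [] []
      simp only [List.nil_append] at hB
      rw [hB]
      have hfin := filter_goN word.toList []
      rw [modifyHead_nil_append] at hfin
      simp only [List.nil_append, hfin]
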